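-- pv_equiv track=rewrite | github.com/se2p/pynguin | src/pynguin/pynguinml_utils/utils.py | parse_until
-- ===== SOURCE A (Python) =====
-- def parse_until(start_idx: int, text: str, stop_chars: str = '') -> tuple[str, int]:
--     """
--     Extracts characters from `text` starting at index `start_idx` until a character in
--     `stop_chars` is encountered. Spaces in the text are skipped.
--
--     Args:
--         start_idx (int): The index in `text` at which to start parsing.
--         text (str): The string to parse.
--         stop_chars (str, optional): A string containing characters that will stop the
--                                     parsing. Defaults to '' (i.e., no stop characters).
--
--     Returns:
--         tuple[str, int]: A tuple where the first element is the accumulated string of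
--                          characters, and the second element is the index immediately
--                          after the parsed segment.
--
--     Raises:
--         ValueError: If `start_idx` is out of bounds for `text`.
--     """
--     if start_idx >= len(text):
--         raise ValueError(f'Unable to process "{text}"; likely an incorrect input format.')
--
--     result = ''
--     i = start_idx
--     for i in range(start_idx, len(text)):
--         ch = text[i]
--         # Skip spaces.
--         if ch == ' ':
--             continue
--         # If the character is one of the stop_chars, break out.
--         if stop_chars and ch in stop_chars:
--             break
--         result += ch
--     # Return the result and the next index (i + 1)
--     return result, i + 1
-- ===== SOURCE B (Python) =====
-- def parse_until(start_idx: int, text: str, stop_chars: str = '') -> tuple[str, int]: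
--     # Two-phase: locate the stop boundary first, then slice & drop spaces.
--     n = len(text)
--     if start_idx >= n:
--         raise ValueError(f'Unable to process "{text}"; likely an incorrect input format.')
--     stops = {c for c in stop_chars if c != ' '}
--     end = next((j for j in range(start_idx, n) if text[j] in stops), n)
--     return ''.join(c for c in text[start_idx:end] if c != ' '), min(end + 1, n)
-- ===== Notes on version B (the rewrite author's own statement) =====
-- stated objective: alternative
-- what changed: A accumulates the result character by character in one loop with continue/break; B first locates the stop boundary with a single search for the first non-space stop character, then produces the result as a slice of the text with spaces dropped, and the next index as min(end+1, n).
-- outside the precondition, e.g. on parse_until(-1, 'ab', ''): A returns ('bab', 2), B returns ('b', 2)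
import Mathlib
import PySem

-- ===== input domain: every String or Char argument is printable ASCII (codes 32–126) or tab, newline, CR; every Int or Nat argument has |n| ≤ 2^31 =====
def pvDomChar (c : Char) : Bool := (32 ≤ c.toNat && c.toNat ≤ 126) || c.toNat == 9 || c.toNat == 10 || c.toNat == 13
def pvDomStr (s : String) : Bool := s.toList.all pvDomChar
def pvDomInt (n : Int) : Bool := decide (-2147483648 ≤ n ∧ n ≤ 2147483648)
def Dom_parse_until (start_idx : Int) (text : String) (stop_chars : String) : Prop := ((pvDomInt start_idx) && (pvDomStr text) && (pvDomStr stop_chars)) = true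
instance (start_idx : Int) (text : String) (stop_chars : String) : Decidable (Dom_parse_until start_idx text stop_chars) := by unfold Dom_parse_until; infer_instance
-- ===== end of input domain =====

-- B replaces A's accumulating loop by a boundary search followed by a slice with spaces dropped (alternative decomposition, same cost).


-- ===== PORT A =====
-- the 'for i in range(start_idx, len(text))' loop: state = (result, i); returns on break or end of range
def pvAStep (cs stop : List Char) : List Int → List Char → Int → List Char × Int
  | [], res, i => (res, i)
  | j :: rest, res, _ =>
    let ch := PySem.List.pyGetD cs j ' '   -- text[i]; in range for every index of the loop under Pre_
    if ch = ' ' then pvAStep cs stop rest res j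
    else if stop ≠ [] ∧ ch ∈ stop then (res, j)
    else pvAStep cs stop rest (res ++ [ch]) j

def parse_until (start_idx : Int) (text : String) (stop_chars : String) : String × Int :=
  -- Python raises ValueError when start_idx ≥ len(text); that region is excluded by Pre_.
  let cs := text.toList
  let p := pvAStep cs stop_chars.toList (PySem.List.pyRange start_idx (cs.length : Int) 1) [] start_idx
  (String.ofList p.1, p.2 + 1)

-- ===== PORT B =====
def parse_until_alt (start_idx : Int) (text : String) (stop_chars : String) : String × Int :=
  let cs := text.toList
  let n : Int := cs.length
  let stops : PySem.Set Char := PySem.Set.ofList (stop_chars.toList.filter (fun c => c ≠ ' '))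
  let e : Int := ((PySem.List.pyRange start_idx n 1).find?
                    (fun j => PySem.Set.contains stops (PySem.List.pyGetD cs j ' '))).getD n
  (String.ofList ((PySem.List.slice cs (some start_idx) (some e)).filter (fun c => c ≠ ' ')),
   min (e + 1) n)

-- ===== PRECONDITION & SPEC =====
-- Pre_ excludes start_idx ≥ len(text) and start_idx < -len(text), where A raises (ValueError / IndexError),
-- and -len(text) ≤ start_idx < 0, where A's returned string is an accident of negative-index wraparound
-- (it re-reads the suffix and then the whole text) that B's slicing cannot and should not reproduce.
def Pre_parse_until (start_idx : Int) (text : String) (stop_chars : String) : Prop :=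
  0 ≤ start_idx ∧ start_idx < (text.toList.length : Int)
instance (start_idx : Int) (text : String) (stop_chars : String) : Decidable (Pre_parse_until start_idx text stop_chars) := by unfold Pre_parse_until; infer_instance
def pvWitness_parse_until : Int × String × String := (1, "a b,c", ",;")

def Spec_parse_until (start_idx : Int) (text : String) (stop_chars : String) (out : String × Int) : Prop := out = parse_until_alt start_idx text stop_chars
instance (start_idx : Int) (text : String) (stop_chars : String) (out : String × Int) : Decidable (Spec_parse_until start_idx text stop_chars out) := by unfold Spec_parse_until; infer_instance

-- ===== CLAIM (what is proved, stated in full; the proofs are below) =====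
def Claim_equal_parse_until : Prop := ∀ (start_idx : Int) (text : String) (stop_chars : String), Dom_parse_until start_idx text stop_chars → Pre_parse_until start_idx text stop_chars → Spec_parse_until start_idx text stop_chars (parse_until start_idx text stop_chars)

-- ===== LEMMAS AND PROOFS =====

-- the boundary predicate B searches with
def pvP (cs stop : List Char) (j : Int) : Bool :=
  PySem.Set.contains (PySem.Set.ofList (stop.filter (fun c => c ≠ ' '))) (PySem.List.pyGetD cs j ' ')

lemma pvP_iff (cs stop : List Char) (j : Int) :
    pvP cs stop j = true ↔ (PySem.List.pyGetD cs j ' ' ≠ ' ' ∧ PySem.List.pyGetD cs j ' ' ∈ stop) := by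
  simp [pvP, PySem.Set.mem_ofList, List.mem_filter, and_comm]

-- B's boundary lies between a and n
lemma pvE_bounds (cs stop : List Char) (a n : Int) (ha : a ≤ n) :
    a ≤ ((PySem.List.pyRange a n 1).find? (pvP cs stop)).getD n ∧
      ((PySem.List.pyRange a n 1).find? (pvP cs stop)).getD n ≤ n := by
  cases h : (PySem.List.pyRange a n 1).find? (pvP cs stop) with
  | none => simp only [Option.getD_none]; exact ⟨ha, le_refl n⟩
  | some j =>
    have hj : j ∈ PySem.List.pyRange a n 1 := List.mem_of_find?_eq_some h
    rw [PySem.List.mem_pyRange_one] at hj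
    simp only [Option.getD_some]
    omega

lemma pv_slice_cons (cs : List Char) (s e : Int) (h0 : 0 ≤ s) (hse : s < e)
    (hn : s < (cs.length : Int)) :
    PySem.List.slice cs (some s) (some e) =
      cs[s.toNat]'(by omega) :: PySem.List.slice cs (some (s + 1)) (some e) := by
  rw [PySem.List.slice_toNat cs h0 (by omega), PySem.List.slice_toNat cs (by omega) (by omega)]
  have hs : s.toNat < cs.length := by omega
  rw [List.drop_eq_getElem_cons hs]
  have h1 : (s + 1).toNat = s.toNat + 1 := by omega
  have h2 : e.toNat - s.toNat = (e.toNat - (s + 1).toNat) + 1 := by omega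
  rw [h2, List.take_succ_cons, h1]

-- main invariant: the A loop from s equals "slice to the boundary, spaces dropped"
lemma pv_main (cs stop : List Char) :
    ∀ (t : Nat) (s : Int) (res : List Char) (i : Int), 0 ≤ s → s + t = (cs.length : Int) →
      pvAStep cs stop (PySem.List.pyRange s (cs.length : Int) 1) res i =
        (res ++ (PySem.List.slice cs (some s)
                  (some (((PySem.List.pyRange s (cs.length : Int) 1).find? (pvP cs stop)).getD (cs.length : Int)))).filter (fun c => c ≠ ' '),
         if s = (cs.length : Int) then i
         else if ((PySem.List.pyRange s (cs.length : Int) 1).find? (pvP cs stop)).getD (cs.length : Int) < (cs.length : Int)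
              then ((PySem.List.pyRange s (cs.length : Int) 1).find? (pvP cs stop)).getD (cs.length : Int)
              else (cs.length : Int) - 1) := by
  intro t
  induction t with
  | zero =>
    intro s res i h0 hsum
    have hs : s = (cs.length : Int) := by omega
    subst hs
    rw [PySem.List.pyRange_one_eq_nil (le_refl _)]
    simp [pvAStep, PySem.List.slice_toNat cs h0 h0]
  | succ t ih =>
    intro s res i h0 hsum
    have hlt : s < (cs.length : Int) := by omega
    rw [PySem.List.pyRange_one_cons hlt]
    have hch : PySem.List.pyGetD cs s ' ' = cs[s.toNat]'(by omega) :=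
      PySem.List.pyGetD_eq_getElem cs ' ' h0 hlt
    have hb := pvE_bounds cs stop (s + 1) (cs.length : Int) (by omega)
    set e' : Int := ((PySem.List.pyRange (s+1) (cs.length : Int) 1).find? (pvP cs stop)).getD (cs.length : Int) with he'
    have hne : ¬ s = (cs.length : Int) := by omega
    by_cases hsp : PySem.List.pyGetD cs s ' ' = ' '
    · -- space: skipped by A, never a stop for B
      rw [List.find?_cons_of_neg (h := by
        simp only [Bool.not_eq_true]
        rw [Bool.eq_false_iff, Ne, pvP_iff]; exact fun h => h.1 hsp)]
      simp only [pvAStep, if_pos hsp]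
      rw [ih (s+1) res s (by omega) (by omega), ← he', if_neg hne, Prod.mk.injEq]
      refine ⟨?_, ?_⟩
      · rw [pv_slice_cons cs s e' h0 (by omega) hlt]
        simp [hch ▸ hsp]
      · by_cases hs1 : s + 1 = (cs.length : Int)
        · have he2 : e' = (cs.length : Int) := by omega
          rw [if_pos hs1, he2, if_neg (by omega)]; omega
        · rw [if_neg hs1]
    · by_cases hstop : stop ≠ [] ∧ PySem.List.pyGetD cs s ' ' ∈ stop
      · -- stop char: A breaks here, B's search finds exactly this index
        have hp : pvP cs stop s = true := (pvP_iff cs stop s).2 ⟨hsp, hstop.2⟩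
        rw [List.find?_cons_of_pos (h := hp)]
        simp only [pvAStep, if_neg hsp, if_pos hstop, Option.getD_some]
        rw [PySem.List.slice_toNat cs h0 h0, if_neg hne, if_pos hlt]
        simp
      · -- ordinary char: appended by A, not a stop for B
        rw [List.find?_cons_of_neg (h := by
          simp only [Bool.not_eq_true]
          rw [Bool.eq_false_iff, Ne, pvP_iff]
          intro h
          exact hstop ⟨by intro hnil; rw [hnil] at h; exact absurd h.2 (List.not_mem_nil), h.2⟩)]
        simp only [pvAStep, if_neg hsp, if_neg hstop]
        rw [ih (s+1) (res ++ [PySem.List.pyGetD cs s ' ']) s (by omega) (by omega), ← he', if_neg hne,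
          Prod.mk.injEq]
        refine ⟨?_, ?_⟩
        · rw [pv_slice_cons cs s e' h0 (by omega) hlt]
          simp [← hch, hsp]
        · by_cases hs1 : s + 1 = (cs.length : Int)
          · have he2 : e' = (cs.length : Int) := by omega
            rw [if_pos hs1, he2, if_neg (by omega)]; omega
          · rw [if_neg hs1]

-- ===== VERDICT (by name: the statement is the Claim_ definition above) =====
theorem parse_until_spec : Claim_equal_parse_until := by
  intro s text stop_chars _ hpre
  obtain ⟨h0, hlt⟩ := hpre
  unfold Spec_parse_until
  have hA : parse_until s text stop_chars =
      (String.ofList (pvAStep text.toList stop_chars.toList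
          (PySem.List.pyRange s (text.toList.length : Int) 1) [] s).1,
       (pvAStep text.toList stop_chars.toList
          (PySem.List.pyRange s (text.toList.length : Int) 1) [] s).2 + 1) := rfl
  have hB : parse_until_alt s text stop_chars =
      (String.ofList ((PySem.List.slice text.toList (some s)
          (some (((PySem.List.pyRange s (text.toList.length : Int) 1).find?
                    (pvP text.toList stop_chars.toList)).getD (text.toList.length : Int)))).filter
          (fun c => c ≠ ' ')),
       min ((((PySem.List.pyRange s (text.toList.length : Int) 1).find?
                (pvP text.toList stop_chars.toList)).getD (text.toList.length : Int)) + 1)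
           (text.toList.length : Int)) := rfl
  rw [hA, hB,
    pv_main text.toList stop_chars.toList ((text.toList.length : Int) - s).toNat s [] s h0 (by omega)]
  have hb := pvE_bounds text.toList stop_chars.toList s (text.toList.length : Int) (le_of_lt hlt)
  set e : Int := ((PySem.List.pyRange s (text.toList.length : Int) 1).find?
      (pvP text.toList stop_chars.toList)).getD (text.toList.length : Int) with he
  have hne : ¬ s = (text.toList.length : Int) := by omega
  rw [if_neg hne]
  refine Prod.ext rfl ?_
  simp only
  by_cases hlt2 : e < (text.toList.length : Int)
  · rw [if_pos hlt2]; omega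
  · rw [if_neg hlt2]; omega
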